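-- pv_equiv track=rewrite | github.com/AlexWUrobot/leetcode_python | Num of Idle Robots.py | numIdleDrives
-- ===== SOURCE A (Python) =====
-- from typing import List
--
-- def numIdleDrives(x: List[int], y: List[int]) -> int:
--     # Initialize a counter for idle drives
--     count = 0
--     # Create a list of coordinate pairs
--     coordinates = [*zip(x, y)]
--     # Iterate through each coordinate pair
--     for x, y in coordinates:
--         # Filter coordinates where x is greater than the current x and y is the same
--         x_min = list(filter(lambda a: x > a[0] and y == a[1], coordinates))
--         # Filter coordinates where x is less than the current x and y is the same
--         x_max = list(filter(lambda a: x < a[0] and y == a[1], coordinates))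
--         # Filter coordinates where y is greater than the current y and x is the same
--         y_min = list(filter(lambda a: y > a[1] and x == a[0], coordinates))
--         # Filter coordinates where y is less than the current y and x is the same
--         y_max = list(filter(lambda a: y < a[1] and x == a[0], coordinates))
--
--         # If there are non-empty lists for all four filters, increment the count
--         if x_min and x_max and y_min and y_max:
--             count += 1
--     return count
-- ===== SOURCE B (Python) =====
-- def numIdleDrives(x, y):
--     pts = list(zip(x, y))
--     row = {}  # y-value -> (min x, max x) in that row
--     col = {}  # x-value -> (min y, max y) in that column
--     for a, b in pts:
--         if b in row:
--             lo, hi = row[b]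
--             row[b] = (min(lo, a), max(hi, a))
--         else:
--             row[b] = (a, a)
--         if a in col:
--             lo, hi = col[a]
--             col[a] = (min(lo, b), max(hi, b))
--         else:
--             col[a] = (b, b)
--     return sum(1 for a, b in pts
--                if row[b][0] < a < row[b][1] and col[a][0] < b < col[a][1])
-- ===== Notes on version B (the rewrite author's own statement) =====
-- stated objective: faster
-- what changed: Replaces A's per-point scan with four filters over all coordinates by a single pass building per-row and per-column (min, max) dictionaries, then counting points whose x is strictly between its row's min/max and y strictly between its column's min/max.
import Mathlib
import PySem

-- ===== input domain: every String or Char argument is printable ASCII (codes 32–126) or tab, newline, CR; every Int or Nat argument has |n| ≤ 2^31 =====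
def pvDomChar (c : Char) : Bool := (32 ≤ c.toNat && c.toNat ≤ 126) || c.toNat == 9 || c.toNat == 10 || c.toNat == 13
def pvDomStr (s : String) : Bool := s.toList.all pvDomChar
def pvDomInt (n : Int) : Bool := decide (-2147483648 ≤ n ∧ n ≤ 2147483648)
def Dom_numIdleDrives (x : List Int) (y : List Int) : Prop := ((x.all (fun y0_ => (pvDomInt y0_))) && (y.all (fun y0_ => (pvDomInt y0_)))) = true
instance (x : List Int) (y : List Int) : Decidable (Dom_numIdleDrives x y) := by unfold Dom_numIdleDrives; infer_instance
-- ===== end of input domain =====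

-- B replaces A's quadratic four-filters-per-point scan by one pass building per-row and
-- per-column (min, max) dictionaries, then counts points strictly inside both ranges (faster, asymptotic).

-- ===== PORT A =====
def numIdleDrives (x : List Int) (y : List Int) : Int :=
  let coordinates := List.zip x y
  coordinates.foldl (fun count p =>
    let x_min := coordinates.filter (fun a => p.1 > a.1 && p.2 == a.2)
    let x_max := coordinates.filter (fun a => p.1 < a.1 && p.2 == a.2)
    let y_min := coordinates.filter (fun a => p.2 > a.2 && p.1 == a.1)
    let y_max := coordinates.filter (fun a => p.2 < a.2 && p.1 == a.1)
    if !x_min.isEmpty && !x_max.isEmpty && !y_min.isEmpty && !y_max.isEmpty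
    then count + 1 else count) 0

-- ===== PORT B =====
-- update a group dictionary entry with one more value (the if b in row / else branch of Source B)
def pvStep (d : PySem.Dict Int (Int × Int)) (k v : Int) : PySem.Dict Int (Int × Int) :=
  match d.get? k with
  | some (lo, hi) => d.insert k (min lo v, max hi v)
  | none => d.insert k (v, v)

def numIdleDrives_alt (x : List Int) (y : List Int) : Int :=
  let pts := List.zip x y
  let row := pts.foldl (fun d p => pvStep d p.2 p.1) PySem.Dict.empty
  let col := pts.foldl (fun d p => pvStep d p.1 p.2) PySem.Dict.empty
  pts.foldl (fun c p =>
    match row.get? p.2, col.get? p.1 with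
    | some (lo, hi), some (lo2, hi2) =>
        if lo < p.1 ∧ p.1 < hi ∧ lo2 < p.2 ∧ p.2 < hi2 then c + 1 else c
    | _, _ => c) 0

-- ===== PRECONDITION & SPEC =====
def Spec_numIdleDrives (x : List Int) (y : List Int) (out : Int) : Prop := out = numIdleDrives_alt x y
instance (x : List Int) (y : List Int) (out : Int) : Decidable (Spec_numIdleDrives x y out) := by unfold Spec_numIdleDrives; infer_instance

-- ===== CLAIM (what is proved, stated in full; the proofs are below) =====
def Claim_equal_numIdleDrives : Prop := ∀ (x : List Int) (y : List Int), Dom_numIdleDrives x y → Spec_numIdleDrives x y (numIdleDrives x y)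

-- ===== LEMMAS AND PROOFS =====

theorem pv_foldl_min_lt (vs : List Int) (v a : Int) :
    vs.foldl min v < a ↔ v < a ∨ ∃ u ∈ vs, u < a := by
  induction vs generalizing v with
  | nil => simp
  | cons u vs ih => simp only [List.foldl_cons, ih, min_lt_iff, List.mem_cons]; aesop

theorem pv_foldl_max_gt (vs : List Int) (v a : Int) :
    a < vs.foldl max v ↔ a < v ∨ ∃ u ∈ vs, a < u := by
  induction vs generalizing v with
  | nil => simp
  | cons u vs ih => simp only [List.foldl_cons, ih, lt_max_iff, List.mem_cons]; aesop

-- characterisation of the dictionary built by the pvStep loop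
theorem pvStep_get?_self (d : PySem.Dict Int (Int × Int)) (k v : Int) :
    (pvStep d k v).get? k =
      match d.get? k with
      | some (lo, hi) => some (min lo v, max hi v)
      | none => some (v, v) := by
  unfold pvStep
  cases h : d.get? k with
  | none => rw [PySem.Dict.get?_insert_self]
  | some pr => obtain ⟨lo, hi⟩ := pr; rw [PySem.Dict.get?_insert_self]

theorem pvStep_get?_ne (d : PySem.Dict Int (Int × Int)) (k v k' : Int) (h : k' ≠ k) :
    (pvStep d k v).get? k' = d.get? k' := by
  unfold pvStep
  cases d.get? k with
  | none => rw [PySem.Dict.get?_insert_of_ne _ _ h]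
  | some pr => obtain ⟨lo, hi⟩ := pr; rw [PySem.Dict.get?_insert_of_ne _ _ h]

theorem pvFold_get? (key val : Int × Int → Int) (l : List (Int × Int)) (k : Int) :
    (l.foldl (fun d p => pvStep d (key p) (val p)) PySem.Dict.empty).get? k =
      match (l.filter (fun q => key q == k)).map val with
      | [] => none
      | v :: vs => some (vs.foldl min v, vs.foldl max v) := by
  induction l using List.reverseRecOn with
  | nil => simp [PySem.Dict.get?_empty]
  | append_singleton l p ih =>
    rw [List.foldl_append, List.filter_append, List.map_append, List.foldl_cons, List.foldl_nil]
    by_cases hk : key p = k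
    · subst hk
      simp only [List.filter_cons, beq_self_eq_true, if_pos, List.filter_nil,
        List.map_cons, List.map_nil]
      rw [pvStep_get?_self, ih]
      cases hml : (l.filter (fun q => key q == key p)).map val with
      | nil => simp
      | cons v vs => simp [List.foldl_append]
    · have hfilt : (List.filter (fun q => key q == k) [p]) = [] := by
        simp [hk]
      rw [hfilt]
      simp only [List.map_nil, List.append_nil]
      rw [pvStep_get?_ne _ _ _ _ (Ne.symm hk), ih]

-- the looked-up (min, max) pair characterises strict existence on both sides
theorem pvGet_some (key val : Int × Int → Int) (l : List (Int × Int)) (p : Int × Int)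
    (hp : p ∈ l) :
    ∃ lo hi, (l.foldl (fun d q => pvStep d (key q) (val q)) PySem.Dict.empty).get? (key p)
        = some (lo, hi) ∧
      (∀ a, lo < a ↔ ∃ q ∈ l, key q = key p ∧ val q < a) ∧
      (∀ a, a < hi ↔ ∃ q ∈ l, key q = key p ∧ a < val q) := by
  rw [pvFold_get? key val l (key p)]
  have hmem : p ∈ l.filter (fun q => key q == key p) := by
    simp [List.mem_filter, hp]
  cases hml : (l.filter (fun q => key q == key p)).map val with
  | nil =>
    exfalso
    have : val p ∈ (l.filter (fun q => key q == key p)).map val := List.mem_map_of_mem hmem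
    rw [hml] at this; exact absurd this (List.not_mem_nil)
  | cons v vs =>
    refine ⟨vs.foldl min v, vs.foldl max v, rfl, ?_, ?_⟩ <;> intro a
    · rw [pv_foldl_min_lt]
      have : (v < a ∨ ∃ u ∈ vs, u < a) ↔ ∃ u ∈ v :: vs, u < a := by
        aesop
      rw [this, ← hml]
      simp only [List.mem_map, List.mem_filter, beq_iff_eq]
      constructor
      · rintro ⟨u, ⟨q, ⟨hql, hqk⟩, rfl⟩, hua⟩; exact ⟨q, hql, hqk, hua⟩
      · rintro ⟨q, hql, hqk, hqa⟩; exact ⟨val q, ⟨q, ⟨hql, hqk⟩, rfl⟩, hqa⟩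
    · rw [pv_foldl_max_gt]
      have : (a < v ∨ ∃ u ∈ vs, a < u) ↔ ∃ u ∈ v :: vs, a < u := by
        aesop
      rw [this, ← hml]
      simp only [List.mem_map, List.mem_filter, beq_iff_eq]
      constructor
      · rintro ⟨u, ⟨q, ⟨hql, hqk⟩, rfl⟩, hua⟩; exact ⟨q, hql, hqk, hua⟩
      · rintro ⟨q, hql, hqk, hqa⟩; exact ⟨val q, ⟨q, ⟨hql, hqk⟩, rfl⟩, hqa⟩

theorem pv_filter_nonempty (l : List (Int × Int)) (f : Int × Int → Bool) :
    (!(l.filter f).isEmpty) = true ↔ ∃ q ∈ l, f q = true := by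
  simp [List.isEmpty_eq_false_iff, List.eq_nil_iff_forall_not_mem, List.mem_filter]

-- ===== VERDICT (by name: the statement is the Claim_ definition above) =====
theorem numIdleDrives_spec : Claim_equal_numIdleDrives := by
  intro x y _
  unfold Spec_numIdleDrives numIdleDrives numIdleDrives_alt
  apply PySem.List.foldl_congr_mem
  intro c p hp
  obtain ⟨lo, hi, hrow, hlo, hhi⟩ := pvGet_some Prod.snd Prod.fst (List.zip x y) p hp
  obtain ⟨lo2, hi2, hcol, hlo2, hhi2⟩ := pvGet_some Prod.fst Prod.snd (List.zip x y) p hp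
  rw [hrow, hcol]
  dsimp only
  have hc : (!((List.zip x y).filter (fun a => p.1 > a.1 && p.2 == a.2)).isEmpty &&
      !((List.zip x y).filter (fun a => p.1 < a.1 && p.2 == a.2)).isEmpty &&
      !((List.zip x y).filter (fun a => p.2 > a.2 && p.1 == a.1)).isEmpty &&
      !((List.zip x y).filter (fun a => p.2 < a.2 && p.1 == a.1)).isEmpty) = true ↔
      (lo < p.1 ∧ p.1 < hi ∧ lo2 < p.2 ∧ p.2 < hi2) := by
    rw [Bool.and_eq_true, Bool.and_eq_true, Bool.and_eq_true]
    rw [pv_filter_nonempty, pv_filter_nonempty, pv_filter_nonempty, pv_filter_nonempty]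
    rw [hlo p.1, hhi p.1, hlo2 p.2, hhi2 p.2]
    simp only [decide_eq_true_eq, Bool.and_eq_true, beq_iff_eq, gt_iff_lt]
    constructor
    · rintro ⟨⟨⟨h1, h2⟩, h3⟩, h4⟩
      exact ⟨by obtain ⟨q, hq, ha, hb⟩ := h1; exact ⟨q, hq, hb.symm, ha⟩,
             by obtain ⟨q, hq, ha, hb⟩ := h2; exact ⟨q, hq, hb.symm, ha⟩,
             by obtain ⟨q, hq, ha, hb⟩ := h3; exact ⟨q, hq, hb.symm, ha⟩,
             by obtain ⟨q, hq, ha, hb⟩ := h4; exact ⟨q, hq, hb.symm, ha⟩⟩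
    · rintro ⟨h1, h2, h3, h4⟩
      exact ⟨⟨⟨by obtain ⟨q, hq, hb, ha⟩ := h1; exact ⟨q, hq, ha, hb.symm⟩,
               by obtain ⟨q, hq, hb, ha⟩ := h2; exact ⟨q, hq, ha, hb.symm⟩⟩,
               by obtain ⟨q, hq, hb, ha⟩ := h3; exact ⟨q, hq, ha, hb.symm⟩⟩,
               by obtain ⟨q, hq, hb, ha⟩ := h4; exact ⟨q, hq, ha, hb.symm⟩⟩
  by_cases h : lo < p.1 ∧ p.1 < hi ∧ lo2 < p.2 ∧ p.2 < hi2
  · rw [if_pos (hc.mpr h), if_pos h]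
  · rw [if_neg (fun hb => h (hc.mp hb)), if_neg h]
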